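-- pv_equiv track=rewrite | github.com/Enriqson/tcc | generate_data/parse_data.py | calculate_additional_limits_and_offsets
-- ===== SOURCE A (Python) =====
-- ADDITIONAL_DATASET_COUNT = 5
--
-- def calculate_additional_limits_and_offsets(initial_dataset_count, total_data_count):
--     # Calculate the approximate size of each chunk
--     remainder_data_size = total_data_count- initial_dataset_count
--     additional_chunk_size = remainder_data_size // ADDITIONAL_DATASET_COUNT
--     remainder = remainder_data_size % ADDITIONAL_DATASET_COUNT  # Extra elements to distribute
--
--     limits = []
--     offsets = []
--     offset = initial_dataset_count
--
--     for i in range(ADDITIONAL_DATASET_COUNT):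
--         # Calculate the size for this chunk (add 1 if within remainder)
--         current_chunk_size = additional_chunk_size + (1 if i < remainder else 0)
--         limit = current_chunk_size
--
--         # Store the offset and limit
--         limits.append(limit)
--         offsets.append(offset)
--
--         # Update offset for the next chunk
--         offset += limit
--
--     return offsets,limits
-- ===== SOURCE B (Python) =====
-- def calculate_additional_limits_and_offsets(initial_dataset_count, total_data_count):
--     q, r = divmod(total_data_count - initial_dataset_count, 5)
--     limits = [q + (1 if i < r else 0) for i in range(5)]
--     offsets = [initial_dataset_count + i * q + min(i, r) for i in range(5)]
--     return offsets, limits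
-- ===== Notes on version B (the rewrite author's own statement) =====
-- stated objective: simpler
-- what changed: Replaces the single offset-carrying loop with two closed-form comprehensions: limits[i] = q + (i < r) and offsets[i] = initial + i*q + min(i, r), eliminating the running accumulator.
import Mathlib
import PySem

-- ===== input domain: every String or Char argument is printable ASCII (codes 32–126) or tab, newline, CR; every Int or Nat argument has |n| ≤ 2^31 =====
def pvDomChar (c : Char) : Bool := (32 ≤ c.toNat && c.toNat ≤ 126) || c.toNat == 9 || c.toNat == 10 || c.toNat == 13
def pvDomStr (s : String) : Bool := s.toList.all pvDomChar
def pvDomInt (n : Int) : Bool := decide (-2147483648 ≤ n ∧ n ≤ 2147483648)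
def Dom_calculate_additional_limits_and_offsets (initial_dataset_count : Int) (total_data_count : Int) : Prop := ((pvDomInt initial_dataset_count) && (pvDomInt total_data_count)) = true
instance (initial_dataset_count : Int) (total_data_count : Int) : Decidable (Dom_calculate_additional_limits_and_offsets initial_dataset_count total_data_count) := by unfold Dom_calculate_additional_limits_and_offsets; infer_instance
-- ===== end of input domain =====

-- B replaces A's running-offset loop with two closed-form comprehensions (simpler decomposition; same cost).

-- ===== PORT A =====
-- loop state: (limits, offsets, offset), exactly A's three variables
def calculate_additional_limits_and_offsets (initial_dataset_count : Int) (total_data_count : Int) : List Int × List Int :=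
  let remainder_data_size := total_data_count - initial_dataset_count
  let additional_chunk_size := PySem.Int.floordiv remainder_data_size 5
  let remainder := PySem.Int.mod remainder_data_size 5
  let st := (PySem.List.pyRange 0 5 1).foldl
    (fun (st : List Int × List Int × Int) i =>
      let (limits, offsets, offset) := st
      let current_chunk_size := additional_chunk_size + (if i < remainder then 1 else 0)
      let limit := current_chunk_size
      (limits ++ [limit], offsets ++ [offset], offset + limit))
    ([], [], initial_dataset_count)
  (st.2.1, st.1)

-- ===== PORT B =====
def calculate_additional_limits_and_offsets_alt (initial_dataset_count : Int) (total_data_count : Int) : List Int × List Int :=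
  let q := PySem.Int.floordiv (total_data_count - initial_dataset_count) 5
  let r := PySem.Int.mod (total_data_count - initial_dataset_count) 5
  let limits := (PySem.List.pyRange 0 5 1).map (fun i => q + (if i < r then 1 else 0))
  let offsets := (PySem.List.pyRange 0 5 1).map (fun i => initial_dataset_count + i * q + min i r)
  (offsets, limits)

-- ===== PRECONDITION & SPEC =====
def Spec_calculate_additional_limits_and_offsets (initial_dataset_count : Int) (total_data_count : Int) (out : List Int × List Int) : Prop := out = calculate_additional_limits_and_offsets_alt initial_dataset_count total_data_count
instance (initial_dataset_count : Int) (total_data_count : Int) (out : List Int × List Int) : Decidable (Spec_calculate_additional_limits_and_offsets initial_dataset_count total_data_count out) := by unfold Spec_calculate_additional_limits_and_offsets; infer_instance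

-- ===== CLAIM (what is proved, stated in full; the proofs are below) =====
def Claim_equal_calculate_additional_limits_and_offsets : Prop := ∀ (initial_dataset_count : Int) (total_data_count : Int), Dom_calculate_additional_limits_and_offsets initial_dataset_count total_data_count → Spec_calculate_additional_limits_and_offsets initial_dataset_count total_data_count (calculate_additional_limits_and_offsets initial_dataset_count total_data_count)

-- ===== LEMMAS AND PROOFS =====

-- ===== VERDICT (by name: the statement is the Claim_ definition above) =====
theorem calculate_additional_limits_and_offsets_spec : Claim_equal_calculate_additional_limits_and_offsets := by
  intro a b _
  unfold Spec_calculate_additional_limits_and_offsets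
  unfold calculate_additional_limits_and_offsets calculate_additional_limits_and_offsets_alt
  have hr0 : 0 ≤ PySem.Int.mod (b - a) 5 := by
    rw [PySem.Int.mod_eq_emod_of_pos (by norm_num)]
    exact Int.emod_nonneg _ (by norm_num)
  have hr5 : PySem.Int.mod (b - a) 5 < 5 := by
    rw [PySem.Int.mod_eq_emod_of_pos (by norm_num)]
    exact Int.emod_lt_of_pos _ (by norm_num)
  set q := PySem.Int.floordiv (b - a) 5 with hq
  set r := PySem.Int.mod (b - a) 5 with hr
  have h5 : PySem.List.pyRange 0 5 1 = [0, 1, 2, 3, 4] := by decide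
  simp only [h5, List.foldl, List.map, List.nil_append, List.cons_append]
  simp only [Prod.mk.injEq, List.cons.injEq, and_true]
  rw [← hq, ← hr]
  refine ⟨⟨?_, ?_, ?_, ?_, ?_⟩, ?_, ?_, ?_, ?_, ?_⟩ <;>
    simp only [min_def] <;> split_ifs <;> omega
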